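-- pv_equiv track=rewrite | github.com/amsritech/jenkins_lib | python_scripts/python_programs/func8.py | choose_states
-- ===== SOURCE A (Python) =====
-- def choose_states(budget, costs):
--     total_cost = 0
--     chosen_states = []
--     for state, cost in costs.items():
--         if total_cost + cost > budget:
--             break
--         total_cost += cost
--         chosen_states.append(state)
--     return chosen_states
-- ===== SOURCE B (Python) =====
-- def choose_states(budget, costs):
--     # phase 1: prefix sums of the costs, aligned with the states
--     sums = []
--     run = 0
--     for c in costs.values():
--         run += c
--         sums.append(run)
--     # phase 2: cut index = first position whose prefix sum exceeds the budget
--     k = len(sums)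
--     for i, s in enumerate(sums):
--         if s > budget:
--             k = i
--             break
--     return list(costs)[:k]
-- ===== Notes on version B (the rewrite author's own statement) =====
-- stated objective: alternative
-- what changed: A's single fused loop that accumulates the running cost and appends states until the break is split into a prefix-sum pass, a separate cut-index scan, and a slice of the key list; B maintains no chosen list during accumulation.
import Mathlib
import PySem

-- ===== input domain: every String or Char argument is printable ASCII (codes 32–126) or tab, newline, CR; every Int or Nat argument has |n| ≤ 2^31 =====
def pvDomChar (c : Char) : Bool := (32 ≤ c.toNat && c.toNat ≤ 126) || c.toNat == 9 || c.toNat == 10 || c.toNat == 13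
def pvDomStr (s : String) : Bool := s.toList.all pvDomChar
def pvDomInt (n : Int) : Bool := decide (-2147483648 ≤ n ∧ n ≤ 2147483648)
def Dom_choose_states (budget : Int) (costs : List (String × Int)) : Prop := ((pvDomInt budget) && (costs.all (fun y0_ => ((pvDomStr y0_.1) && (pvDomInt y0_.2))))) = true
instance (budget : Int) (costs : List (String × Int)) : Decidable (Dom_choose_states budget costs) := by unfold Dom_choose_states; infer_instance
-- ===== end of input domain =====

-- B splits A's fused accumulate-and-append loop into a prefix-sum pass plus a separate cut-index scan and slice (alternative decomposition, same cost).


-- ===== PORT A =====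
def chooseGoA (budget : Int) : Int → List String → List (String × Int) → List String
  | _total, acc, [] => acc
  | total, acc, (state, cost) :: rest =>
    if total + cost > budget then acc
    else chooseGoA budget (total + cost) (acc ++ [state]) rest

def choose_states (budget : Int) (costs : List (String × Int)) : List String :=
  chooseGoA budget 0 [] costs

-- ===== PORT B =====
-- phase 1 of Source B: running prefix sums of the cost values
def prefixSumsB : Int → List Int → List Int
  | _run, [] => []
  | run, c :: rest => (run + c) :: prefixSumsB (run + c) rest

-- phase 2 of Source B: first index whose prefix sum exceeds the budget (else length)
def cutIdxB (budget : Int) : List Int → Nat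
  | [] => 0
  | s :: rest => if s > budget then 0 else 1 + cutIdxB budget rest

def choose_states_alt (budget : Int) (costs : List (String × Int)) : List String :=
  let sums := prefixSumsB 0 (costs.map Prod.snd)
  (costs.map Prod.fst).take (cutIdxB budget sums)

-- ===== PRECONDITION & SPEC =====
def Spec_choose_states (budget : Int) (costs : List (String × Int)) (out : List String) : Prop := out = choose_states_alt budget costs
instance (budget : Int) (costs : List (String × Int)) (out : List String) : Decidable (Spec_choose_states budget costs out) := by unfold Spec_choose_states; infer_instance

-- ===== CLAIM (what is proved, stated in full; the proofs are below) =====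
def Claim_equal_choose_states : Prop := ∀ (budget : Int) (costs : List (String × Int)), Dom_choose_states budget costs → Spec_choose_states budget costs (choose_states budget costs)

-- ===== LEMMAS AND PROOFS =====

theorem chooseGoA_eq (budget : Int) :
    ∀ (costs : List (String × Int)) (t : Int) (acc : List String),
      chooseGoA budget t acc costs =
        acc ++ (costs.map Prod.fst).take (cutIdxB budget (prefixSumsB t (costs.map Prod.snd)))
  | [], t, acc => by simp [chooseGoA, prefixSumsB, cutIdxB]
  | (state, cost) :: rest, t, acc => by
      simp only [chooseGoA, List.map_cons, prefixSumsB, cutIdxB]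
      by_cases h : t + cost > budget
      · simp [h]
      · rw [Nat.add_comm 1]; simp [h, chooseGoA_eq budget rest (t + cost) (acc ++ [state]), List.take_succ_cons]

-- ===== VERDICT (by name: the statement is the Claim_ definition above) =====
theorem choose_states_spec : Claim_equal_choose_states := by
  intro budget costs _
  unfold Spec_choose_states choose_states choose_states_alt
  simp [chooseGoA_eq]
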